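-- pv_equiv track=rewrite | github.com/MrBrantCode/unitest_baseline | mut_generate/mist_train_cf/cf_78458/solution.py | five_nine_twelve
-- ===== SOURCE A (Python) =====
-- def five_nine_twelve(n: int) -> int:
--     def contains_digit_5(num: int) -> bool:
--         return '5' in str(num)
--
--     def divisible_by_9_or_12(num: int) -> bool:
--         return num % 9 == 0 or num % 12 == 0
--
--     def sum_of_digits_divisible_by_3(num: int) -> bool:
--         return sum(map(int, str(num))) % 3 == 0
--
--     count = 0
--     for i in range(n):
--         if contains_digit_5(i) and divisible_by_9_or_12(i) and sum_of_digits_divisible_by_3(i):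
--             count += 1
--     return count
-- ===== SOURCE B (Python) =====
-- def five_nine_twelve(n: int) -> int:
--     # Inclusion-exclusion: instead of scanning every i < n, scan only the
--     # multiples of 9 and of 12 (counting multiples of 36 twice, so subtract them).
--     def ok(i: int) -> bool:
--         return '5' in str(i) and sum(map(int, str(i))) % 3 == 0
--
--     return (sum(ok(i) for i in range(0, n, 9))
--             + sum(ok(i) for i in range(0, n, 12))
--             - sum(ok(i) for i in range(0, n, 36)))
-- ===== Notes on version B (the rewrite author's own statement) =====
-- stated objective: faster
-- what changed: Instead of scanning every i in range(n) and testing divisibility, B scans only the multiples of 9 and of 12 via range(0, n, step) and subtracts the doubly counted multiples of 36 (inclusion-exclusion), visiting about a sixth of the integers.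
import Mathlib
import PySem

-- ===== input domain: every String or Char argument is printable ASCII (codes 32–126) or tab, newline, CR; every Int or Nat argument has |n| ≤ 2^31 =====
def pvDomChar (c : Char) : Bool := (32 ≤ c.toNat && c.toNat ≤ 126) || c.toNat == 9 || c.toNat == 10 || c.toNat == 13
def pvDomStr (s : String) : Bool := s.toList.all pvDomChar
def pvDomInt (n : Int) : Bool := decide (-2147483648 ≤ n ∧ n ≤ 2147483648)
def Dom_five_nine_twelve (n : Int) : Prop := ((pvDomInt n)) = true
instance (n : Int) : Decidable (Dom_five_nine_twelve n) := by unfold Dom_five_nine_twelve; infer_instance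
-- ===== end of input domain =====

-- B replaces A's scan of every i < n by an inclusion-exclusion scan of only the
-- multiples of 9 and 12 (minus those of 36): a constant-factor speed-up.


-- ===== PORT A =====
-- '5' in str(num)
def pvContainsDigit5 (num : Int) : Bool := PySem.Str.isIn "5" (PySem.Int.toStr num)
-- num % 9 == 0 or num % 12 == 0
def pvDivisibleBy9or12 (num : Int) : Bool :=
  PySem.Int.mod num 9 == 0 || PySem.Int.mod num 12 == 0
-- sum(map(int, str(num))) % 3 == 0 ; int(c) is ported as (ofStr? c).getD 0 — the
-- loop only reaches num ≥ 0, whose str() is all digits, so ofStr? is never none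
def pvSumDigitsDiv3 (num : Int) : Bool :=
  PySem.Int.mod (((PySem.Int.toStr num).toList.map
    (fun c => (PySem.Int.ofStr? (String.ofList [c])).getD 0)).sum) 3 == 0

def five_nine_twelve (n : Int) : Int :=
  (PySem.List.pyRange 0 n 1).foldl
    (fun count i =>
      if pvContainsDigit5 i && pvDivisibleBy9or12 i && pvSumDigitsDiv3 i
      then count + 1 else count) 0

-- ===== PORT B =====
-- ok(i) = '5' in str(i) and sum(map(int, str(i))) % 3 == 0
def pvOkAlt (i : Int) : Bool :=
  PySem.Str.isIn "5" (PySem.Int.toStr i) &&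
  PySem.Int.mod (((PySem.Int.toStr i).toList.map
    (fun c => (PySem.Int.ofStr? (String.ofList [c])).getD 0)).sum) 3 == 0

-- sum(ok(i) for i in range(0, n, step)) — booleans summed as 0/1
def pvSumOk (n step : Int) : Int :=
  ((PySem.List.pyRange 0 n step).map (fun i => if pvOkAlt i then (1 : Int) else 0)).sum

def five_nine_twelve_alt (n : Int) : Int :=
  pvSumOk n 9 + pvSumOk n 12 - pvSumOk n 36

-- ===== PRECONDITION & SPEC =====
def Spec_five_nine_twelve (n : Int) (out : Int) : Prop := out = five_nine_twelve_alt n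
instance (n : Int) (out : Int) : Decidable (Spec_five_nine_twelve n out) := by unfold Spec_five_nine_twelve; infer_instance

-- ===== CLAIM (what is proved, stated in full; the proofs are below) =====
def Claim_equal_five_nine_twelve : Prop := ∀ (n : Int), Dom_five_nine_twelve n → Spec_five_nine_twelve n (five_nine_twelve n)

-- ===== LEMMAS AND PROOFS =====

-- [0, 1, …, m-1] as integers (kept abstract so simp does not reshape it)
def pvCastRange (m : Nat) : List Int := (List.range m).map (fun (j : Nat) => (j : Int))

lemma pvCastRange_succ (m : Nat) :
    pvCastRange (m + 1) = pvCastRange m ++ [(m : Int)] := by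
  simp [pvCastRange, List.range_succ]

lemma pvModBeq (m b : Int) : (PySem.Int.mod m b == 0) = decide (b ∣ m) := by
  by_cases hd : b ∣ m
  · have h0 := (PySem.Int.mod_eq_zero_iff_dvd m b).mpr hd
    simp [h0, hd]
  · have h0 : PySem.Int.mod m b ≠ 0 := fun h => hd ((PySem.Int.mod_eq_zero_iff_dvd m b).mp h)
    simp [h0, hd]

-- A's loop is a countP over range n
lemma pvA_eq_countP (n : Int) :
    five_nine_twelve n =
      ((pvCastRange n.toNat).countP
        (fun i => pvContainsDigit5 i && pvDivisibleBy9or12 i && pvSumDigitsDiv3 i) : Int) := by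
  unfold five_nine_twelve
  rw [PySem.List.foldl_if_add_one, PySem.List.pyRange_one]
  simp only [zero_add, sub_zero]
  rfl

-- pyRange 0 m s for a positive Nat step is the list of the first ⌈m/s⌉ multiples of s
lemma pvRange_step_nat (m s : Nat) (hs : 0 < s) :
    PySem.List.pyRange 0 (m : Int) (s : Int) =
      (List.range ((m + s - 1) / s)).map (fun k => ((s * k : Nat) : Int)) := by
  rw [PySem.List.pyRange_of_pos 0 (m : Int) (by exact_mod_cast hs)]
  have harg : (if (0 : Int) < (m : Int) then (((m : Int) - 0 + s - 1) / s).toNat else 0)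
      = (m + s - 1) / s := by
    by_cases hm : 0 < m
    · rw [if_pos (by exact_mod_cast hm)]
      have h1 : ((m : Int) - 0 + s - 1) = ((m + s - 1 : Nat) : Int) := by push_cast; omega
      rw [h1, ← Int.natCast_div, Int.toNat_natCast]
    · have hm0 : m = 0 := by omega
      subst hm0
      rw [if_neg (by simp)]
      symm
      apply Nat.div_eq_of_lt
      omega
  rw [harg]
  congr 1
  funext k
  push_cast
  ring

-- counting over the multiples list = counting over all of range m with a divisibility guard
lemma pvCountP_multiples (p : Int → Bool) (s : Nat) (hs : 0 < s) (m : Nat) :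
    ((List.range ((m + s - 1) / s)).map (fun k => ((s * k : Nat) : Int))).countP p =
      (pvCastRange m).countP (fun i => decide ((s : Int) ∣ i) && p i) := by
  induction m with
  | zero =>
      rw [show (0 + s - 1) / s = 0 from Nat.div_eq_of_lt (by omega)]
      simp [pvCastRange]
  | succ m ih =>
      have hsucc : (m + 1 + s - 1) / s = (m + s) / s := by congr 1; omega
      have h1 : m + s = (m + s - 1) + 1 := by omega
      have hstep : (m + s) / s = (m + s - 1) / s + (if s ∣ m + s then 1 else 0) := by
        rw [h1, Nat.succ_div, ← h1]
      have hdvd : s ∣ m + s ↔ s ∣ m := Nat.dvd_add_self_right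
      rw [pvCastRange_succ, List.countP_append]
      by_cases hd : s ∣ m
      · obtain ⟨q, hq⟩ := hd
        have hq1 : (m + s - 1) / s = q := by
          subst hq
          rw [show s * q + s - 1 = s * q + (s - 1) from by omega,
              Nat.mul_add_div hs, Nat.div_eq_of_lt (by omega)]
          omega
        have hlen : (m + 1 + s - 1) / s = q + 1 := by
          rw [hsucc, hstep, hq1, if_pos (hdvd.mpr ⟨q, hq⟩)]
        rw [hq1] at ih
        rw [hlen, List.range_succ, List.map_append, List.countP_append, ih]
        have hdint : ((s : Int) ∣ (m : Int)) := Int.natCast_dvd_natCast.mpr ⟨q, hq⟩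
        have hval : ((s : Int)) * (q : Int) = (m : Int) := by exact_mod_cast hq.symm
        simp [List.countP_cons, hdint, hval]
      · have hlen : (m + 1 + s - 1) / s = (m + s - 1) / s := by
          rw [hsucc, hstep, if_neg (by simpa [hdvd] using hd)]
          omega
        rw [hlen, ih]
        have hnd : ¬ ((s : Int) ∣ (m : Int)) := by
          simpa [Int.natCast_dvd_natCast] using hd
        simp [hnd]

-- B's summand over step s equals the guarded countP over all of range n.toNat
lemma pvSumOk_eq_countP (n : Int) (s : Nat) (hs : 0 < s) :
    pvSumOk n (s : Int) =
      ((pvCastRange n.toNat).countP (fun i => decide ((s : Int) ∣ i) && pvOkAlt i) : Int) := by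
  unfold pvSumOk
  rw [PySem.List.sum_map_ite_one_zero]
  by_cases hn : 0 < n
  · have hm : n = ((n.toNat : Nat) : Int) := by omega
    conv_lhs => rw [hm]
    rw [pvRange_step_nat n.toNat s hs, pvCountP_multiples pvOkAlt s hs]
  · have h1 : PySem.List.pyRange 0 n (s : Int) = [] := by
      rw [PySem.List.pyRange_of_pos 0 n (by exact_mod_cast hs), if_neg (by omega)]
      simp
    have h2 : n.toNat = 0 := by omega
    rw [h1, h2]
    simp [pvCastRange]

-- the pointwise inclusion-exclusion identity, summed over range m
lemma pvKey (m : Nat) :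
    (((pvCastRange m).countP
        (fun i => pvContainsDigit5 i && pvDivisibleBy9or12 i && pvSumDigitsDiv3 i) : Nat) : Int) =
      (((pvCastRange m).countP (fun i => decide ((9 : Int) ∣ i) && pvOkAlt i) : Nat) : Int)
      + (((pvCastRange m).countP (fun i => decide ((12 : Int) ∣ i) && pvOkAlt i) : Nat) : Int)
      - (((pvCastRange m).countP (fun i => decide ((36 : Int) ∣ i) && pvOkAlt i) : Nat) : Int) := by
  induction m with
  | zero => simp [pvCastRange]
  | succ m ih =>
      rw [pvCastRange_succ]
      simp only [List.countP_append]
      have hpt : ((if (pvContainsDigit5 (m : Int) && pvDivisibleBy9or12 (m : Int) && pvSumDigitsDiv3 (m : Int)) then (1 : Int) else 0)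
          = (if (decide ((9 : Int) ∣ (m : Int)) && pvOkAlt (m : Int)) then (1 : Int) else 0)
            + (if (decide ((12 : Int) ∣ (m : Int)) && pvOkAlt (m : Int)) then (1 : Int) else 0)
            - (if (decide ((36 : Int) ∣ (m : Int)) && pvOkAlt (m : Int)) then (1 : Int) else 0)) := by
        have h9 := pvModBeq (m : Int) 9
        have h12 := pvModBeq (m : Int) 12
        have h36 : ((36 : Int) ∣ (m : Int)) ↔ ((9 : Int) ∣ (m : Int)) ∧ ((12 : Int) ∣ (m : Int)) := by
          omega
        unfold pvDivisibleBy9or12 pvOkAlt pvContainsDigit5 pvSumDigitsDiv3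
        rw [h9, h12]
        by_cases a : PySem.Str.isIn "5" (PySem.Int.toStr (m : Int)) = true <;>
        by_cases d : (PySem.Int.mod (((PySem.Int.toStr (m : Int)).toList.map
            (fun c => (PySem.Int.ofStr? (String.ofList [c])).getD 0)).sum) 3 == 0) = true <;>
        by_cases h9' : (9 : Int) ∣ (m : Int) <;>
        by_cases h12' : (12 : Int) ∣ (m : Int) <;>
          simp [h9', h12', h36]
      simp only [List.countP_cons, List.countP_nil]
      split_ifs at hpt ⊢ <;> push_cast at ih ⊢ <;> omega

-- ===== VERDICT (by name: the statement is the Claim_ definition above) =====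
theorem five_nine_twelve_spec : Claim_equal_five_nine_twelve := by
  intro n _
  show five_nine_twelve n = five_nine_twelve_alt n
  rw [pvA_eq_countP]
  unfold five_nine_twelve_alt
  have h9 := pvSumOk_eq_countP n 9 (by norm_num)
  have h12 := pvSumOk_eq_countP n 12 (by norm_num)
  have h36 := pvSumOk_eq_countP n 36 (by norm_num)
  simp only [Nat.cast_ofNat] at h9 h12 h36
  rw [h9, h12, h36]
  exact pvKey n.toNat
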